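-- pv_equiv track=rewrite | github.com/waitefy/2_13_Linkov | main.py | build_graph_test_dfs
-- ===== SOURCE A (Python) =====
-- def build_graph_test_dfs(repo_graph: dict, root_name: str) -> dict:
--     """
--     Построение графа зависимостей в тестовом режиме на основе файла.
--     """
--     graph, seen = {}, set()
--
--     def dfs(n: str):
--         if n in seen:
--             return
--         seen.add(n)
--
--         deps = repo_graph.get(n, [])
--         graph[n] = deps
--
--         for d in deps:
--             dfs(d)
--
--     dfs(root_name)
--     return graph
-- ===== SOURCE B (Python) =====
-- def build_graph_test_dfs(repo_graph: dict, root_name: str) -> dict: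
--     """
--     Two-stage: an iterative explicit-stack traversal records only the DFS
--     preorder of reachable nodes; a dict comprehension over that order then
--     maps each node to its dependency list.
--     """
--     order, seen, stack = [], set(), [root_name]
--     while stack:
--         n = stack.pop()
--         if n not in seen:
--             seen.add(n)
--             order.append(n)
--             stack += reversed(repo_graph.get(n, []))
--     return {n: repo_graph.get(n, []) for n in order}
-- ===== Notes on version B (the rewrite author's own statement) =====
-- stated objective: alternative
-- what changed: Replaces the nested recursive dfs that builds the dict as it recurses with a two-stage computation: an iterative explicit-stack traversal that only records the DFS preorder, then a dict comprehension mapping each visited node to its dependency list.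
import Mathlib
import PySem

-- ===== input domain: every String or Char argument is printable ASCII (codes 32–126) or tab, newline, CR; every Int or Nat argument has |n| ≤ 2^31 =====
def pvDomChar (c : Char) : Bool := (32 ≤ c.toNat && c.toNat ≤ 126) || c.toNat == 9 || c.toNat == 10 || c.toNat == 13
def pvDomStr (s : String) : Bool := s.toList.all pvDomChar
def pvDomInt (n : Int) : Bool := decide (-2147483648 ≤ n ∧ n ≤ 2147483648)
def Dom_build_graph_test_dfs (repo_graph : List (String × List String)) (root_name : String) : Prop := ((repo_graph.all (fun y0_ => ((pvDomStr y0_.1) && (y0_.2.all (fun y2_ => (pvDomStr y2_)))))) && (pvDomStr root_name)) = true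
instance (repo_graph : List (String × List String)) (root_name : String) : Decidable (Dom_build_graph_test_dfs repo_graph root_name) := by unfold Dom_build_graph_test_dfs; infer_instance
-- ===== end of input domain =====

-- B replaces the nested recursive dict-building dfs by a two-stage computation: an iterative
-- explicit-stack traversal recording only the DFS preorder, then a dict comprehension over that
-- order; equivalence is about the RETURN value (A mutates nothing observable).

-- ===== PORT A =====
-- state = (graph, seen); fuel 1 + |root :: all dep lists| bounds the recursion depth
-- (each nested call marks a previously unseen node), so the guard never fires.
abbrev PVSt := PySem.Dict String (List String) × PySem.Set String

def dfsA (rg : List (String × List String)) : Nat → PVSt → String → PVSt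
  | 0, st, _ => st
  | f+1, st, n =>
      if n ∈ st.2 then st
      else
        let deps := PySem.Dict.getD (PySem.Dict.mk rg) n []
        List.foldl (dfsA rg f) (PySem.Dict.insert st.1 n deps, PySem.Set.add st.2 n) deps

def build_graph_test_dfs (repo_graph : List (String × List String)) (root_name : String) : List (String × List String) :=
  (dfsA repo_graph (1 + (root_name :: (repo_graph.map Prod.snd).flatten).length)
      (PySem.Dict.empty, PySem.Set.empty) root_name).1.items

-- ===== PORT B =====
-- Stage 1: the Python while-loop over the stack, accumulating the preorder 'order'.
-- The Python stack has its top at the END; it is modeled with the top at the HEAD, so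
-- 'n = stack.pop()' is the head and 'stack += reversed(deps)' becomes 'deps ++ rest'.
-- fuel 1 + L*L (L = |root :: all dep lists|) bounds the number of loop iterations.
def visitB (rg : List (String × List String)) : Nat → PySem.Set String → List String → List String → List String
  | 0, _, ord, _ => ord
  | _+1, _, ord, [] => ord
  | f+1, seen, ord, n :: rest =>
      if n ∈ seen then visitB rg f seen ord rest
      else visitB rg f (PySem.Set.add seen n) (ord ++ [n])
        (PySem.Dict.getD (PySem.Dict.mk rg) n [] ++ rest)

-- Stage 2: the dict comprehension '{n: repo_graph.get(n, []) for n in order}'.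
def build_graph_test_dfs_alt (repo_graph : List (String × List String)) (root_name : String) : List (String × List String) :=
  let names := root_name :: (repo_graph.map Prod.snd).flatten
  let order := visitB repo_graph (1 + names.length * names.length)
      PySem.Set.empty [] [root_name]
  (List.foldl (fun d n => PySem.Dict.insert d n (PySem.Dict.getD (PySem.Dict.mk repo_graph) n []))
      PySem.Dict.empty order).items

-- ===== PRECONDITION & SPEC =====
def Spec_build_graph_test_dfs (repo_graph : List (String × List String)) (root_name : String) (out : List (String × List String)) : Prop := out = build_graph_test_dfs_alt repo_graph root_name
instance (repo_graph : List (String × List String)) (root_name : String) (out : List (String × List String)) : Decidable (Spec_build_graph_test_dfs repo_graph root_name out) := by unfold Spec_build_graph_test_dfs; infer_instance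

-- ===== CLAIM (what is proved, stated in full; the proofs are below) =====
def Claim_equal_build_graph_test_dfs : Prop := ∀ (repo_graph : List (String × List String)) (root_name : String), Dom_build_graph_test_dfs repo_graph root_name → Spec_build_graph_test_dfs repo_graph root_name (build_graph_test_dfs repo_graph root_name)

-- ===== LEMMAS AND PROOFS =====

-- proof-only intermediate: the same stack machine as visitB, but threading the dict like A does
def runB (rg : List (String × List String)) : Nat → PVSt → List String → PySem.Dict String (List String)
  | 0, st, _ => st.1
  | _+1, st, [] => st.1
  | f+1, st, n :: rest =>
      if n ∈ st.2 then runB rg f st rest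
      else
        let deps := PySem.Dict.getD (PySem.Dict.mk rg) n []
        runB rg f (PySem.Dict.insert st.1 n deps, PySem.Set.add st.2 n) (deps ++ rest)

-- the finite universe every visited node lives in
def pvNames (rg : List (String × List String)) (root : String) : List String :=
  root :: (rg.map Prod.snd).flatten

def pvU (rg : List (String × List String)) (root : String) : List String :=
  PySem.Set.ofList (pvNames rg root)

-- number of still-unseen universe nodes
def pvM (rg : List (String × List String)) (root : String) (seen : PySem.Set String) : Nat :=
  ((pvU rg root).filter (fun k => !(decide (k ∈ seen)))).length

def pvInv (rg : List (String × List String)) (root : String) (seen : PySem.Set String) : Prop :=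
  ∀ x ∈ seen, x ∈ pvU rg root

lemma pv_getD_len (rg : List (String × List String)) (n : String) :
    (PySem.Dict.getD (PySem.Dict.mk rg) n []).length ≤ ((rg.map Prod.snd).flatten).length := by
  induction rg with
  | nil =>
      rw [show PySem.Dict.getD (PySem.Dict.mk ([] : List (String × List String))) n [] = [] from rfl]
      simp
  | cons p t ih =>
      obtain ⟨k, v⟩ := p
      rw [PySem.Dict.getD_eq_get?_getD, PySem.Dict.get?_mk_cons]
      rw [PySem.Dict.getD_eq_get?_getD] at ih
      simp only [List.map_cons, List.flatten_cons, List.length_append]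
      by_cases h : (k == n) = true
      · rw [if_pos h]
        simp only [Option.getD_some]
        omega
      · rw [if_neg h]
        omega

lemma pv_getD_mem (rg : List (String × List String)) (n x : String)
    (hx : x ∈ PySem.Dict.getD (PySem.Dict.mk rg) n []) : x ∈ (rg.map Prod.snd).flatten := by
  induction rg with
  | nil =>
      rw [show PySem.Dict.getD (PySem.Dict.mk ([] : List (String × List String))) n [] = [] from rfl] at hx
      simp at hx
  | cons p t ih =>
      obtain ⟨k, v⟩ := p
      rw [PySem.Dict.getD_eq_get?_getD, PySem.Dict.get?_mk_cons] at hx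
      rw [PySem.Dict.getD_eq_get?_getD] at ih
      simp only [List.map_cons, List.flatten_cons, List.mem_append]
      by_cases h : (k == n) = true
      · rw [if_pos h] at hx
        simp only [Option.getD_some] at hx
        exact Or.inl hx
      · rw [if_neg h] at hx
        exact Or.inr (ih hx)

lemma pv_deps_subU (rg : List (String × List String)) (root n x : String)
    (hx : x ∈ PySem.Dict.getD (PySem.Dict.mk rg) n []) : x ∈ pvU rg root := by
  exact (PySem.Set.mem_ofList _ _).mpr (List.mem_cons_of_mem _ (pv_getD_mem rg n x hx))

lemma pv_root_memU (rg : List (String × List String)) (root : String) : root ∈ pvU rg root :=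
  (PySem.Set.mem_ofList _ _).mpr List.mem_cons_self

lemma pv_filter_mono {α : Type} (l : List α) (p q : α → Bool)
    (h : ∀ a ∈ l, p a = true → q a = true) : (l.filter p).length ≤ (l.filter q).length := by
  induction l with
  | nil => simp
  | cons a t ih =>
      have ht : ∀ b ∈ t, p b = true → q b = true := fun b hb => h b (List.mem_cons_of_mem _ hb)
      rw [List.filter_cons, List.filter_cons]
      by_cases hp : p a = true
      · rw [if_pos hp, if_pos (h a List.mem_cons_self hp)]
        simpa using ih ht
      · rw [if_neg hp]
        by_cases hq : q a = true
        · rw [if_pos hq]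
          exact Nat.le_succ_of_le (ih ht)
        · rw [if_neg hq]
          exact ih ht

lemma pv_filter_point {α : Type} [DecidableEq α] (l : List α) (hl : l.Nodup)
    (p q : α → Bool) (n : α) (hn : n ∈ l) (hpn : p n = true) (hqn : q n = false)
    (hother : ∀ a, a ≠ n → p a = q a) :
    (l.filter p).length = (l.filter q).length + 1 := by
  induction l with
  | nil => simp at hn
  | cons a t ih =>
      rcases List.nodup_cons.mp hl with ⟨hnot, hnd⟩
      by_cases ha : a = n
      · subst ha
        have hfix : ∀ b ∈ t, p b = q b := fun b hb =>
          hother b (by rintro rfl; exact hnot hb)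
        rw [List.filter_cons, if_pos hpn, List.filter_cons, if_neg (by simp [hqn]),
            List.filter_congr hfix]
        simp
      · have hn' : n ∈ t := by
          rcases List.mem_cons.mp hn with h | h
          · exact absurd h.symm ha
          · exact h
        have hrec := ih hnd hn'
        rw [List.filter_cons, List.filter_cons, hother a ha]
        by_cases hq : q a = true
        · rw [if_pos hq, if_pos hq]
          simp only [List.length_cons]
          omega
        · rw [if_neg hq, if_neg hq]
          omega

-- pvM drops exactly by one when an unseen universe node is marked
lemma pvM_add (rg : List (String × List String)) (root : String) (seen : PySem.Set String)
    (n : String) (hnU : n ∈ pvU rg root) (hns : n ∉ seen) :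
    pvM rg root seen = pvM rg root (PySem.Set.add seen n) + 1 := by
  unfold pvM
  refine pv_filter_point _ (PySem.Set.nodup_ofList _) _ _ n hnU (by simp [hns]) ?_ ?_
  · have : n ∈ PySem.Set.add seen n := (PySem.Set.mem_add _ _ _).mpr (Or.inr rfl)
    simp [this]
  · intro a ha
    have : (a ∈ PySem.Set.add seen n) = (a ∈ seen ∨ a = n) := propext (PySem.Set.mem_add _ _ _)
    simp [this, ha]

lemma pvM_le (rg : List (String × List String)) (root : String) (seen : PySem.Set String) :
    pvM rg root seen ≤ (pvNames rg root).length := by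
  unfold pvM
  calc ((pvU rg root).filter _).length ≤ (pvU rg root).length := List.length_filter_le _ _
    _ ≤ (pvNames rg root).length := PySem.Set.length_ofList_le _

-- seen only grows under dfsA
lemma dfsA_seen_mono (rg : List (String × List String)) :
    ∀ (f : Nat) (st : PVSt) (n x : String), x ∈ st.2 → x ∈ (dfsA rg f st n).2 := by
  intro f
  induction f with
  | zero => intro st n x hx; simpa [dfsA] using hx
  | succ f ih =>
      intro st n x hx
      rw [dfsA]
      by_cases h : n ∈ st.2
      · rw [if_pos h]; exact hx
      · rw [if_neg h]
        have hfold : ∀ (l : List String) (st' : PVSt), x ∈ st'.2 →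
            x ∈ (List.foldl (dfsA rg f) st' l).2 := by
          intro l
          induction l with
          | nil => intro st' hx'; simpa using hx'
          | cons d t iht => intro st' hx'; exact iht _ (ih st' d x hx')
        exact hfold _ _ ((PySem.Set.mem_add _ _ _).mpr (Or.inl hx))

-- seen stays inside the universe
lemma dfsA_inv (rg : List (String × List String)) (root : String) :
    ∀ (f : Nat) (st : PVSt) (n : String), pvInv rg root st.2 → n ∈ pvU rg root →
      pvInv rg root (dfsA rg f st n).2 := by
  intro f
  induction f with
  | zero => intro st n h _; simpa [dfsA] using h
  | succ f ih =>
      intro st n hinv hnU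
      rw [dfsA]
      by_cases h : n ∈ st.2
      · rw [if_pos h]; exact hinv
      · rw [if_neg h]
        have hfold : ∀ (l : List String) (st' : PVSt), (∀ d ∈ l, d ∈ pvU rg root) →
            pvInv rg root st'.2 → pvInv rg root (List.foldl (dfsA rg f) st' l).2 := by
          intro l
          induction l with
          | nil => intro st' _ h'; simpa using h'
          | cons d t iht =>
              intro st' hl h'
              exact iht _ (fun d' hd' => hl d' (List.mem_cons_of_mem _ hd'))
                (ih st' d h' (hl d List.mem_cons_self))
        refine hfold _ _ (fun d hd => pv_deps_subU rg root n d hd) ?_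
        intro x hx
        rcases (PySem.Set.mem_add _ _ _).mp hx with h' | rfl
        · exact hinv x h'
        · exact hnU

lemma pvM_dfsA_le (rg : List (String × List String)) (root : String) (f : Nat) (st : PVSt) (n : String) :
    pvM rg root (dfsA rg f st n).2 ≤ pvM rg root st.2 := by
  unfold pvM
  refine pv_filter_mono _ _ _ ?_
  intro a _ hp
  simp only [Bool.not_eq_true', decide_eq_false_iff_not] at hp ⊢
  exact fun hmem => hp (dfsA_seen_mono rg f st n a hmem)

-- fuel does not matter once it exceeds the number of unseen universe nodes
lemma dfsA_fuel (rg : List (String × List String)) (root : String) :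
    ∀ (f1 f2 : Nat) (st : PVSt) (n : String), pvInv rg root st.2 → n ∈ pvU rg root →
      pvM rg root st.2 < f1 → pvM rg root st.2 < f2 → dfsA rg f1 st n = dfsA rg f2 st n := by
  intro f1
  induction f1 with
  | zero => intro f2 st n _ _ h1 _; omega
  | succ g ih =>
      intro f2 st n hinv hnU h1 h2
      rcases f2 with _ | h2'
      · omega
      rw [dfsA, dfsA]
      by_cases h : n ∈ st.2
      · rw [if_pos h, if_pos h]
      · rw [if_neg h, if_neg h]
        have hM : pvM rg root st.2 = pvM rg root (PySem.Set.add st.2 n) + 1 :=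
          pvM_add rg root st.2 n hnU h
        have hinv' : pvInv rg root (PySem.Set.add st.2 n) := by
          intro x hx
          rcases (PySem.Set.mem_add _ _ _).mp hx with h' | rfl
          · exact hinv x h'
          · exact hnU
        have hfold : ∀ (l : List String) (s : PVSt), (∀ d ∈ l, d ∈ pvU rg root) →
            pvInv rg root s.2 → pvM rg root s.2 < g → pvM rg root s.2 < h2' →
            List.foldl (dfsA rg g) s l = List.foldl (dfsA rg h2') s l := by
          intro l
          induction l with
          | nil => intro s _ _ _ _; rfl
          | cons d t iht =>
              intro s hl hsinv hm1 hm2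
              rw [List.foldl_cons, List.foldl_cons,
                ih h2' s d hsinv (hl d List.mem_cons_self) hm1 hm2]
              refine iht _ (fun d' hd' => hl d' (List.mem_cons_of_mem _ hd'))
                (dfsA_inv rg root h2' s d hsinv (hl d List.mem_cons_self)) ?_ ?_
              · exact lt_of_le_of_lt (pvM_dfsA_le rg root h2' s d) hm1
              · exact lt_of_le_of_lt (pvM_dfsA_le rg root h2' s d) hm2
        exact hfold _ (PySem.Dict.insert st.1 n (PySem.Dict.getD (PySem.Dict.mk rg) n []),
            PySem.Set.add st.2 n) (fun d hd => pv_deps_subU rg root n d hd) hinv'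
          (show pvM rg root (PySem.Set.add st.2 n) < g by omega)
          (show pvM rg root (PySem.Set.add st.2 n) < h2' by omega)

lemma foldl_dfsA_fuel (rg : List (String × List String)) (root : String)
    (f1 f2 : Nat) (l : List String) :
    ∀ (s : PVSt), (∀ d ∈ l, d ∈ pvU rg root) → pvInv rg root s.2 →
      pvM rg root s.2 < f1 → pvM rg root s.2 < f2 →
      List.foldl (dfsA rg f1) s l = List.foldl (dfsA rg f2) s l := by
  induction l with
  | nil => intro s _ _ _ _; rfl
  | cons d t ih =>
      intro s hl hsinv hm1 hm2
      rw [List.foldl_cons, List.foldl_cons,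
        dfsA_fuel rg root f1 f2 s d hsinv (hl d List.mem_cons_self) hm1 hm2]
      refine ih _ (fun d' hd' => hl d' (List.mem_cons_of_mem _ hd'))
        (dfsA_inv rg root f2 s d hsinv (hl d List.mem_cons_self)) ?_ ?_
      · exact lt_of_le_of_lt (pvM_dfsA_le rg root f2 s d) hm1
      · exact lt_of_le_of_lt (pvM_dfsA_le rg root f2 s d) hm2

-- the iterative stack run (with dict) computes the fold of the recursive dfs over the stack
lemma runB_eq_foldl (rg : List (String × List String)) (root : String) :
    ∀ (fB : Nat) (stack : List String) (st : PVSt) (fA : Nat),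
      pvInv rg root st.2 → (∀ x ∈ stack, x ∈ pvU rg root) →
      stack.length + (pvNames rg root).length * pvM rg root st.2 ≤ fB →
      pvM rg root st.2 < fA →
      runB rg fB st stack = (List.foldl (dfsA rg fA) st stack).1 := by
  intro fB
  induction fB with
  | zero =>
      intro stack st fA _ _ hphi _
      cases stack with
      | nil => rfl
      | cons a t => simp only [List.length_cons] at hphi; omega
  | succ fB ih =>
      intro stack st fA hinv hstk hphi hfa
      cases stack with
      | nil => rfl
      | cons n rest =>
          rcases fA with _ | fA'
          · omega
          rw [runB]
          by_cases h : n ∈ st.2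
          · rw [if_pos h, List.foldl_cons,
              show dfsA rg (fA' + 1) st n = st by rw [dfsA]; rw [if_pos h]]
            refine ih rest st (fA' + 1) hinv (fun x hx => hstk x (List.mem_cons_of_mem _ hx))
              ?_ hfa
            simp only [List.length_cons] at hphi
            omega
          · rw [if_neg h]
            have hnU : n ∈ pvU rg root := hstk n List.mem_cons_self
            have hM : pvM rg root st.2 = pvM rg root (PySem.Set.add st.2 n) + 1 :=
              pvM_add rg root st.2 n hnU h
            have hinv' : pvInv rg root (PySem.Set.add st.2 n) := by
              intro x hx
              rcases (PySem.Set.mem_add _ _ _).mp hx with h' | rfl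
              · exact hinv x h'
              · exact hnU
            have hdepsU : ∀ d ∈ PySem.Dict.getD (PySem.Dict.mk rg) n [], d ∈ pvU rg root :=
              fun d hd => pv_deps_subU rg root n d hd
            have hA : dfsA rg (fA' + 1) st n
                = List.foldl (dfsA rg (fA' + 1))
                    (PySem.Dict.insert st.1 n (PySem.Dict.getD (PySem.Dict.mk rg) n []),
                      PySem.Set.add st.2 n)
                    (PySem.Dict.getD (PySem.Dict.mk rg) n []) := by
              rw [dfsA, if_neg h]
              exact foldl_dfsA_fuel rg root fA' (fA' + 1) _ _ hdepsU hinv'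
                (show pvM rg root (PySem.Set.add st.2 n) < fA' by omega)
                (show pvM rg root (PySem.Set.add st.2 n) < fA' + 1 by omega)
            rw [List.foldl_cons, hA, ← List.foldl_append]
            refine ih (PySem.Dict.getD (PySem.Dict.mk rg) n [] ++ rest)
              (PySem.Dict.insert st.1 n (PySem.Dict.getD (PySem.Dict.mk rg) n []),
                PySem.Set.add st.2 n) (fA' + 1) hinv'
              (fun x hx => (List.mem_append.mp hx).elim (hdepsU x)
                (fun h' => hstk x (List.mem_cons_of_mem _ h')))
              ?_ (show pvM rg root (PySem.Set.add st.2 n) < fA' + 1 by omega)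
            -- fuel arithmetic: one iteration consumed, potential drops by at least one
            have hdlen : (PySem.Dict.getD (PySem.Dict.mk rg) n []).length
                < (pvNames rg root).length := by
              have := pv_getD_len rg n
              simp only [pvNames, List.length_cons]
              omega
            have hmul : (pvNames rg root).length * pvM rg root st.2
                = (pvNames rg root).length * pvM rg root (PySem.Set.add st.2 n)
                  + (pvNames rg root).length := by
              rw [hM, Nat.mul_succ]
            simp only [List.length_append, List.length_cons] at hphi ⊢
            omega

-- visitB's order accumulator only collects at the front
lemma visitB_acc (rg : List (String × List String)) :
    ∀ (f : Nat) (seen : PySem.Set String) (ord stack : List String),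
      visitB rg f seen ord stack = ord ++ visitB rg f seen [] stack := by
  intro f
  induction f with
  | zero => intro seen ord stack; simp [visitB]
  | succ f ih =>
      intro seen ord stack
      cases stack with
      | nil => simp [visitB]
      | cons n rest =>
          rw [visitB, visitB]
          by_cases h : n ∈ seen
          · rw [if_pos h, if_pos h]
            exact ih seen ord rest
          · rw [if_neg h, if_neg h]
            simp only [List.nil_append]
            rw [ih (PySem.Set.add seen n) (ord ++ [n]) _, ih (PySem.Set.add seen n) [n] _]
            simp

-- the dict-threading stack machine equals fold-insert over visitB's order
lemma runB_eq_ins (rg : List (String × List String)) :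
    ∀ (f : Nat) (seen : PySem.Set String) (stack : List String)
      (d : PySem.Dict String (List String)),
      runB rg f (d, seen) stack
        = List.foldl (fun d' n => PySem.Dict.insert d' n (PySem.Dict.getD (PySem.Dict.mk rg) n []))
            d (visitB rg f seen [] stack) := by
  intro f
  induction f with
  | zero => intro seen stack d; simp [runB, visitB]
  | succ f ih =>
      intro seen stack d
      cases stack with
      | nil => simp [runB, visitB]
      | cons n rest =>
          rw [runB, visitB]
          by_cases h : n ∈ seen
          · rw [if_pos h, if_pos h]
            exact ih seen rest d
          · rw [if_neg h, if_neg h]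
            simp only [List.nil_append]
            rw [visitB_acc rg f (PySem.Set.add seen n) [n] _]
            simp only [List.foldl_append, List.foldl_cons, List.foldl_nil]
            exact ih (PySem.Set.add seen n) _ _

-- ===== VERDICT (by name: the statement is the Claim_ definition above) =====
theorem build_graph_test_dfs_spec : Claim_equal_build_graph_test_dfs := by
  intro rg root _
  unfold Spec_build_graph_test_dfs build_graph_test_dfs build_graph_test_dfs_alt
  have hinv : pvInv rg root PySem.Set.empty := by
    intro x hx
    exact absurd hx (by simp [PySem.Set.empty])
  have hM : pvM rg root PySem.Set.empty ≤ (pvNames rg root).length := pvM_le rg root _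
  have h := runB_eq_foldl rg root
    (1 + (pvNames rg root).length * (pvNames rg root).length)
    [root] (PySem.Dict.empty, PySem.Set.empty) (1 + (pvNames rg root).length)
    hinv
    (by intro x hx
        simp only [List.mem_singleton] at hx
        rw [hx]
        exact pv_root_memU rg root)
    (show [root].length + (pvNames rg root).length * pvM rg root PySem.Set.empty
        ≤ 1 + (pvNames rg root).length * (pvNames rg root).length by
      simp only [List.length_cons, List.length_nil]
      have := Nat.mul_le_mul_left (pvNames rg root).length hM
      omega)
    (show pvM rg root PySem.Set.empty < 1 + (pvNames rg root).length by omega)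
  simp only [List.foldl_cons, List.foldl_nil] at h
  have h2 := runB_eq_ins rg
    (1 + (pvNames rg root).length * (pvNames rg root).length)
    PySem.Set.empty [root] PySem.Dict.empty
  show (dfsA rg (1 + (pvNames rg root).length) (PySem.Dict.empty, PySem.Set.empty) root).1.items
    = (List.foldl _ PySem.Dict.empty
        (visitB rg (1 + (pvNames rg root).length * (pvNames rg root).length)
          PySem.Set.empty [] [root])).items
  rw [← h2, h]
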